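-- pv_equiv track=rewrite | github.com/gezmi/af_scripts | run_mmseqs2.py | split_input_by_chains
-- ===== SOURCE A (Python) =====
-- def split_input_by_chains(sequence, lengths):
-- 	result = []
-- 	current_pos = 0
--
-- 	for target_length in lengths:
-- 		chain_seq = ""
-- 		actual_length = 0
--
-- 		# Keep adding characters until we reach the target length for this chain
-- 		while actual_length < target_length and current_pos < len(sequence):
-- 			char = sequence[current_pos]
-- 			chain_seq += char
--
-- 			# Only count uppercase letters toward the actual length
-- 			if not char.islower():
-- 				actual_length += 1
--
-- 			current_pos += 1
--
-- 		result.append(chain_seq)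
--
-- 	return result
-- ===== SOURCE B (Python) =====
-- def split_input_by_chains(sequence, lengths):
--     # Index-based: precompute positions of non-lowercase chars, then cut by lookup + slice.
--     ups = [i for i, c in enumerate(sequence) if not c.islower()]
--     result = []
--     current_pos = 0
--     cum = 0
--     for target_length in lengths:
--         if target_length <= 0:
--             result.append("")
--             continue
--         need = cum + target_length - 1
--         if need < len(ups):
--             end = ups[need] + 1
--             result.append(sequence[current_pos:end])
--             current_pos = end
--             cum += target_length
--         else:
--             result.append(sequence[current_pos:])
--             current_pos = len(sequence)
--             cum = len(ups)
--     return result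
-- ===== Notes on version B (the rewrite author's own statement) =====
-- stated objective: faster
-- what changed: B precomputes the index list of non-lowercase character positions once and cuts each chain with a single index lookup plus one slice, replacing A's character-by-character inner while loop with quadratic string concatenation (chain_seq += char).
import Mathlib
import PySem

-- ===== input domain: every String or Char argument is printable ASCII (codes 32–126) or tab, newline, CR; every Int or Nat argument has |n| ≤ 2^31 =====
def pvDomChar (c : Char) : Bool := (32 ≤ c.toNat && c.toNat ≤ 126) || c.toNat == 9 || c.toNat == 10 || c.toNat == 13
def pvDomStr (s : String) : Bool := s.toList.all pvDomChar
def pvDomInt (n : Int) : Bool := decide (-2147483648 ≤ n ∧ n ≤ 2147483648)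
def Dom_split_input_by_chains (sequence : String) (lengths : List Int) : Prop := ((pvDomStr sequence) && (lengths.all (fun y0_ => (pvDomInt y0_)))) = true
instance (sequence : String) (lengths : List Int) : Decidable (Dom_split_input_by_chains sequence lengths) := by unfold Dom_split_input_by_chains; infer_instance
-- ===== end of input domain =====

-- B replaces A's char-by-char inner while loop with a precomputed index of non-lowercase
-- positions plus slice lookups (different decomposition; equal return value, proved below).

-- ===== PORT A =====
-- inner while loop of A: state = (target_length, actual_length, remaining chars, chain so far);
-- returns (chain_seq, remaining chars after this chain)
def aInner (tl al : Int) (cs acc : List Char) : List Char × List Char :=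
  if al < tl then
    match cs with
    | [] => (acc, [])
    | c :: rest =>
        aInner tl (if PySem.Chars.islower c then al else al + 1) rest (acc ++ [c])
  else (acc, cs)
  termination_by cs.length
  decreasing_by simp

-- outer for loop of A: one chain per target length, threading the remaining characters
def aLoop : List Char → List Int → List String
  | _, [] => []
  | cs, tl :: ts =>
      let r := aInner tl 0 cs []
      String.ofList r.1 :: aLoop r.2 ts

def split_input_by_chains (sequence : String) (lengths : List Int) : List String :=
  aLoop sequence.toList lengths

-- ===== PORT B =====
-- ups = [i for i, c in enumerate(sequence) if not c.islower()]
def bUps (cs : List Char) : List Int :=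
  (PySem.List.enumerate cs 0).filterMap
    (fun p => if ¬ PySem.Chars.islower p.2 then some p.1 else none)

-- B's for loop: state = (current_pos, cum); one index lookup + slice per chain
def bLoop (cs : List Char) (ups : List Int) (pos cum : Int) : List Int → List String
  | [] => []
  | tl :: ts =>
      if tl ≤ 0 then
        "" :: bLoop cs ups pos cum ts
      else
        let need := cum + tl - 1
        if need < (ups.length : Int) then
          let e := PySem.List.pyGetD ups need 0 + 1
          String.ofList (PySem.List.slice cs (some pos) (some e)) :: bLoop cs ups e (cum + tl) ts
        else
          String.ofList (PySem.List.slice cs (some pos) none) ::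
            bLoop cs ups (cs.length : Int) (ups.length : Int) ts

def split_input_by_chains_alt (sequence : String) (lengths : List Int) : List String :=
  bLoop sequence.toList (bUps sequence.toList) 0 0 lengths

-- ===== PRECONDITION & SPEC =====
def Spec_split_input_by_chains (sequence : String) (lengths : List Int) (out : List String) : Prop := out = split_input_by_chains_alt sequence lengths
instance (sequence : String) (lengths : List Int) (out : List String) : Decidable (Spec_split_input_by_chains sequence lengths out) := by unfold Spec_split_input_by_chains; infer_instance

-- ===== CLAIM (what is proved, stated in full; the proofs are below) =====
def Claim_equal_split_input_by_chains : Prop := ∀ (sequence : String) (lengths : List Int), Dom_split_input_by_chains sequence lengths → Spec_split_input_by_chains sequence lengths (split_input_by_chains sequence lengths)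

-- ===== LEMMAS AND PROOFS =====

-- proof-side: positions (as Nats) of the non-lowercase characters
def upsN : List Char → List Nat
  | [] => []
  | c :: cs =>
      if PySem.Chars.islower c then (upsN cs).map (· + 1)
      else 0 :: (upsN cs).map (· + 1)

-- Nat-fuel form of A's inner loop
def aInnerN : Nat → List Char → List Char → List Char × List Char
  | 0, cs, acc => (acc, cs)
  | _ + 1, [], acc => (acc, [])
  | r + 1, c :: rest, acc =>
      aInnerN (if PySem.Chars.islower c then r + 1 else r) rest (acc ++ [c])

lemma aInner_eq_aInnerN (cs : List Char) : ∀ (tl al : Int) (acc : List Char),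
    aInner tl al cs acc = aInnerN (tl - al).toNat cs acc := by
  induction cs with
  | nil =>
      intro tl al acc
      by_cases h : al < tl
      · have : ∃ r, (tl - al).toNat = r + 1 := ⟨(tl - al - 1).toNat, by omega⟩
        obtain ⟨r, hr⟩ := this
        rw [aInner, if_pos h, hr, aInnerN]
      · have : (tl - al).toNat = 0 := by omega
        rw [aInner, if_neg h, this, aInnerN]
  | cons c rest ih =>
      intro tl al acc
      by_cases h : al < tl
      · have hr : (tl - al).toNat = (tl - al - 1).toNat + 1 := by omega
        rw [aInner, if_pos h, hr, aInnerN]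
        by_cases hc : PySem.Chars.islower c
        · rw [if_pos hc, if_pos hc, ih]
          congr 1
        · rw [if_neg hc, if_neg hc, ih]
          congr 1
          omega
      · have h0 : (tl - al).toNat = 0 := by omega
        rw [aInner, if_neg h, h0, aInnerN]

lemma upsN_lt_length (cs : List Char) : ∀ n ∈ upsN cs, n < cs.length := by
  induction cs with
  | nil => simp [upsN]
  | cons c rest ih =>
      intro n hn
      simp only [upsN] at hn
      by_cases hc : PySem.Chars.islower c
      · rw [if_pos hc] at hn
        simp only [List.mem_map] at hn
        obtain ⟨m, hm, rfl⟩ := hn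
        have := ih m hm
        simp only [List.length_cons]
        omega
      · rw [if_neg hc] at hn
        simp only [List.mem_cons, List.mem_map] at hn
        rcases hn with rfl | ⟨m, hm, rfl⟩
        · simp
        · have := ih m hm
          simp only [List.length_cons]
          omega

-- the characterisation of A's inner loop: it slices up to (and including) the
-- (t+1)-st non-lowercase character, or takes everything if there are fewer
lemma aInnerN_char (cs : List Char) : ∀ (t : Nat) (acc : List Char),
    aInnerN (t + 1) cs acc =
      if t < (upsN cs).length then
        (acc ++ cs.take ((upsN cs).getD t 0 + 1), cs.drop ((upsN cs).getD t 0 + 1))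
      else (acc ++ cs, []) := by
  induction cs with
  | nil => intro t acc; simp [aInnerN, upsN]
  | cons c rest ih =>
      intro t acc
      by_cases hc : PySem.Chars.islower c
      · have hu : upsN (c :: rest) = (upsN rest).map (· + 1) := by rw [upsN, if_pos hc]
        rw [aInnerN, if_pos hc, ih]
        by_cases ht : t < (upsN rest).length
        · rw [if_pos ht, hu, if_pos (by simpa using ht)]
          have hgd : ((upsN rest).map (· + 1)).getD t 0 = (upsN rest).getD t 0 + 1 := by
            rw [List.getD_eq_getElem _ _ ht, List.getD_eq_getElem _ _ (by simpa using ht),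
              List.getElem_map]
          rw [hgd]
          simp [List.take_succ_cons, List.drop_succ_cons]
        · rw [if_neg ht, hu, if_neg (by simpa using ht)]
          simp
      · have hu : upsN (c :: rest) = 0 :: (upsN rest).map (· + 1) := by rw [upsN, if_neg hc]
        rw [aInnerN, if_neg hc]
        match t with
        | 0 =>
            rw [aInnerN, hu]
            simp
        | k + 1 =>
            rw [ih, hu]
            by_cases hk : k < (upsN rest).length
            · rw [if_pos hk, if_pos (by simp; omega)]
              have hgd : (0 :: (upsN rest).map (· + 1)).getD (k + 1) 0 = (upsN rest).getD k 0 + 1 := by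
                rw [List.getD_cons_succ, List.getD_eq_getElem _ _ hk,
                  List.getD_eq_getElem _ _ (by simpa using hk), List.getElem_map]
              rw [hgd]
              simp [List.take_succ_cons, List.drop_succ_cons]
            · rw [if_neg hk, if_neg (by simp; omega)]
              simp

lemma upsN_append (xs ys : List Char) :
    upsN (xs ++ ys) = upsN xs ++ (upsN ys).map (· + xs.length) := by
  induction xs with
  | nil => simp [upsN]
  | cons c rest ih =>
      by_cases hc : PySem.Chars.islower c
      · simp only [List.cons_append, upsN, if_pos hc, ih, List.map_append, List.map_map]
        congr 1
      · simp only [List.cons_append, upsN, if_neg hc, ih, List.map_append, List.map_map]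
        congr 2

-- taking up to (and including) the (i+1)-st non-lowercase char yields exactly i+1 of them
lemma upsN_take_length (cs : List Char) : ∀ i, i < (upsN cs).length →
    (upsN (cs.take ((upsN cs).getD i 0 + 1))).length = i + 1 := by
  induction cs with
  | nil => simp [upsN]
  | cons c rest ih =>
      intro i hi
      by_cases hc : PySem.Chars.islower c
      · have hu : upsN (c :: rest) = (upsN rest).map (· + 1) := by rw [upsN, if_pos hc]
        rw [hu] at hi ⊢
        have hi' : i < (upsN rest).length := by simpa using hi
        have hgd : ((upsN rest).map (· + 1)).getD i 0 = (upsN rest).getD i 0 + 1 := by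
          rw [List.getD_eq_getElem _ _ hi, List.getD_eq_getElem _ _ hi', List.getElem_map]
        rw [hgd, List.take_succ_cons, upsN, if_pos hc, List.length_map]
        exact ih i hi'
      · have hu : upsN (c :: rest) = 0 :: (upsN rest).map (· + 1) := by rw [upsN, if_neg hc]
        rw [hu] at hi ⊢
        match i with
        | 0 => simp [upsN, if_neg hc]
        | k + 1 =>
            have hk : k < (upsN rest).length := by simpa using hi
            have hgd : (0 :: (upsN rest).map (· + 1)).getD (k + 1) 0 = (upsN rest).getD k 0 + 1 := by
              rw [List.getD_cons_succ, List.getD_eq_getElem _ _ hk,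
                List.getD_eq_getElem _ _ (by simpa using hk), List.getElem_map]
            rw [hgd, List.take_succ_cons, upsN, if_neg hc, List.length_cons, List.length_map]
            rw [ih k hk]

lemma bUps_eq (cs : List Char) : bUps cs = (upsN cs).map (fun (n : Nat) => (n : Int)) := by
  suffices h : ∀ s : Int, (PySem.List.enumerate cs s).filterMap
      (fun p => if ¬ PySem.Chars.islower p.2 then some p.1 else none)
      = (upsN cs).map (fun (n : Nat) => s + (n : Int)) by
    have := h 0
    simpa [bUps] using this
  induction cs with
  | nil => intro s; simp [upsN]
  | cons c rest ih =>
      intro s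
      rw [PySem.List.enumerate_cons, List.filterMap_cons]
      by_cases hc : PySem.Chars.islower c
      · have hu : upsN (c :: rest) = (upsN rest).map (· + 1) := by rw [upsN, if_pos hc]
        rw [hu]
        simp only [hc, not_true_eq_false, if_false]
        rw [ih (s + 1), List.map_map]
        apply List.map_congr_left
        intro n _
        simp only [Function.comp_apply]
        push_cast
        ring
      · have hu : upsN (c :: rest) = 0 :: (upsN rest).map (· + 1) := by rw [upsN, if_neg hc]
        have hsc : (if ¬ PySem.Chars.islower (((s, c) : Int × Char)).2 = true
            then some (((s, c) : Int × Char)).1 else none) = some s := by simp [hc]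
        rw [hu]
        simp only [hsc]
        rw [List.map_cons, ih (s + 1), List.map_map]
        congr 1
        · simp
        · apply List.map_congr_left
          intro n _
          simp only [Function.comp_apply]
          push_cast
          ring

-- main loop invariant: p chars consumed, and cum = number of non-lowercase among them
lemma loop_eq (cs : List Char) (ls : List Int) : ∀ (p : Nat), p ≤ cs.length →
    aLoop (cs.drop p) ls
      = bLoop cs (bUps cs) (p : Int) (((upsN (cs.take p)).length : Nat) : Int) ls := by
  induction ls with
  | nil => intro p _; simp [aLoop, bLoop]
  | cons tl ts ih =>
      intro p hp
      have hb : bUps cs = (upsN cs).map (fun (n : Nat) => (n : Int)) := bUps_eq cs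
      have hdecomp : upsN cs = upsN (cs.take p) ++ (upsN (cs.drop p)).map (· + p) := by
        conv_lhs => rw [← List.take_append_drop p cs]
        rw [upsN_append, List.length_take, Nat.min_eq_left hp]
      have hlen : (upsN cs).length = (upsN (cs.take p)).length + (upsN (cs.drop p)).length := by
        rw [hdecomp, List.length_append, List.length_map]
      rw [aLoop, bLoop]
      by_cases htl : tl ≤ 0
      · -- empty chain, state unchanged
        have h0 : (tl - 0).toNat = 0 := by omega
        rw [if_pos htl]
        simp only [aInner_eq_aInnerN, h0, aInnerN]
        rw [ih p hp]
      · rw [if_neg htl]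
        obtain ⟨t, rfl⟩ : ∃ t : Nat, tl = (t : Int) + 1 := ⟨(tl - 1).toNat, by omega⟩
        have h1 : ((t : Int) + 1 - 0).toNat = t + 1 := by omega
        simp only [aInner_eq_aInnerN, h1]
        rw [aInnerN_char]
        have hneed : (((upsN (cs.take p)).length : Int) + ((t : Int) + 1) - 1)
            = (((upsN (cs.take p)).length + t : Nat) : Int) := by push_cast; ring
        by_cases hcase : t < (upsN (cs.drop p)).length
        · -- chain completed at a non-lowercase char found by index lookup
          rw [if_pos hcase]
          have hjlt : (upsN (cs.drop p)).getD t 0 < (cs.drop p).length := by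
            apply upsN_lt_length
            rw [List.getD_eq_getElem _ _ hcase]
            exact List.getElem_mem _
          have hidx : (upsN (cs.take p)).length + t < (upsN cs).length := by
            rw [hlen]; omega
          have hget : (upsN cs).getD ((upsN (cs.take p)).length + t) 0
              = p + (upsN (cs.drop p)).getD t 0 := by
            rw [hdecomp, List.getD_append_right _ _ _ _ (Nat.le_add_right _ _),
              Nat.add_sub_cancel_left]
            rw [List.getD_eq_getElem _ _ (by simpa using hcase),
              List.getD_eq_getElem _ _ hcase, List.getElem_map]
            omega
          have hcond : (((upsN (cs.take p)).length : Int) + ((t : Int) + 1) - 1)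
              < ((bUps cs).length : Int) := by
            rw [hb, List.length_map, hneed]
            exact_mod_cast hidx
          rw [if_pos hcond]
          have hgd : PySem.List.pyGetD (bUps cs)
                (((upsN (cs.take p)).length : Int) + ((t : Int) + 1) - 1) 0
              = ((p + (upsN (cs.drop p)).getD t 0 : Nat) : Int) := by
            rw [hneed, hb, PySem.List.pyGetD_natCast,
              List.getD_eq_getElem _ _ (by simpa using hidx), List.getElem_map,
              ← List.getD_eq_getElem _ _ hidx, hget]
          rw [hgd]
          have hslice : PySem.List.slice cs (some (p : Int))
                (some (((p + (upsN (cs.drop p)).getD t 0 : Nat) : Int) + 1))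
              = (cs.drop p).take ((upsN (cs.drop p)).getD t 0 + 1) := by
            have h2 : ((p + (upsN (cs.drop p)).getD t 0 : Nat) : Int) + 1
                = ((p + ((upsN (cs.drop p)).getD t 0 + 1) : Nat) : Int) := by push_cast; ring
            rw [h2, PySem.List.slice_natCast]
            congr 1
            omega
          rw [hslice]
          have hdrop : (cs.drop p).drop ((upsN (cs.drop p)).getD t 0 + 1)
              = cs.drop (p + ((upsN (cs.drop p)).getD t 0 + 1)) := by
            rw [List.drop_drop]
          have hp' : p + ((upsN (cs.drop p)).getD t 0 + 1) ≤ cs.length := by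
            have hl := List.length_drop (l := cs) (i := p)
            omega
          have hcnt : (upsN (cs.take (p + ((upsN (cs.drop p)).getD t 0 + 1)))).length
              = (upsN (cs.take p)).length + (t + 1) := by
            rw [List.take_add, upsN_append, List.length_append, List.length_take,
              Nat.min_eq_left hp, List.length_map]
            congr 1
            exact upsN_take_length (cs.drop p) t hcase
          rw [hdrop, ih _ hp', hcnt]
          congr 2
        · -- ran out of non-lowercase chars: take the rest of the string
          rw [if_neg hcase]
          have hcond : ¬ ((((upsN (cs.take p)).length : Int) + ((t : Int) + 1) - 1)
              < ((bUps cs).length : Int)) := by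
            rw [hb, List.length_map, hneed, hlen]
            push_cast
            omega
          rw [if_neg hcond]
          rw [PySem.List.slice_from_natCast cs p]
          have h2 := ih cs.length le_rfl
          rw [List.drop_length, List.take_length] at h2
          rw [List.nil_append, h2]
          congr 2
          rw [hb, List.length_map]

-- ===== VERDICT (by name: the statement is the Claim_ definition above) =====
theorem split_input_by_chains_spec : Claim_equal_split_input_by_chains := by
  intro sequence lengths _
  show split_input_by_chains sequence lengths = split_input_by_chains_alt sequence lengths
  unfold split_input_by_chains split_input_by_chains_alt
  have := loop_eq sequence.toList lengths 0 (Nat.zero_le _)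
  simpa [upsN] using this
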